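-- pv_equiv track=rewrite | github.com/lambdafate/leetcode | written-test/yuanfudao-19sp/test1.py | solve
-- ===== SOURCE A (Python) =====
-- def solve(queue, m):
--     ret = []
--     i = 0
--     while i < len(queue):
--         tmp = queue[i:i+m][::-1]
--         ret += tmp
--         i += m
--     return ret[::-1]
-- ===== SOURCE B (Python) =====
-- def solve(queue, m):
--     # Walk the chunk start indices back-to-front and append the RAW slices:
--     # reversing each chunk and then the whole list only reverses chunk ORDER.
--     ret = []
--     for i in reversed(range(0, len(queue), m)):
--         ret += queue[i:i+m]
--     return ret
-- ===== Notes on version B (the rewrite author's own statement) =====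
-- stated objective: simpler
-- what changed: B walks the chunk start indices of range(0, len, m) in reverse and concatenates the raw slices, exploiting that A's per-chunk reversal and final whole-list reversal cancel; A's index while-loop and both [::-1] passes disappear. Pre_ restricts to positive chunk size m >= 1: for m <= 0 A loops forever on every nonempty queue (returning only on the empty one), and B's range(0, len, m) raises ValueError at m = 0.
-- outside the precondition, e.g. on solve([], 0): A returns [], B raises ValueError; on solve([], -1): A returns [], B returns []
import Mathlib
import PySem

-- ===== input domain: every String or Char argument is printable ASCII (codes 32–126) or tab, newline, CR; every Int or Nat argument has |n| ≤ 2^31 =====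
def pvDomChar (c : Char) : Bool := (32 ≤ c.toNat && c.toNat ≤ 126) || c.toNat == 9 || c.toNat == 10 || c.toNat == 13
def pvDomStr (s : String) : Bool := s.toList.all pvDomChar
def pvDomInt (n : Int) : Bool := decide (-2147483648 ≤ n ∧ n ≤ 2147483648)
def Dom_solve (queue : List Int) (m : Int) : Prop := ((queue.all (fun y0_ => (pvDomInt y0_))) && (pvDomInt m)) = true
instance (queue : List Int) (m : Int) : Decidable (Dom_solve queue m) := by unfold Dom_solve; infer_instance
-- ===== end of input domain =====

-- B walks the chunk start indices in reverse and concatenates the raw slices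
-- (A's per-chunk reversal and final whole-list reversal cancel); objective: simpler.

-- ===== PORT A =====
-- A's while loop, fuel-bounded structural recursion: with m ≥ 1 it makes at most
-- queue.length iterations, so fuel queue.length + 1 never runs out on Pre_.
-- `[::-1]` is ported as List.reverse (exact on full-list slices).
def solveLoopA (queue : List Int) (m : Int) : Nat → Int → List Int → List Int
  | 0, _, ret => ret
  | fuel + 1, i, ret =>
    if i < (queue.length : Int) then
      solveLoopA queue m fuel (i + m)
        (ret ++ (PySem.List.slice queue (some i) (some (i + m))).reverse)
    else ret

def solve (queue : List Int) (m : Int) : List Int :=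
  (solveLoopA queue m (queue.length + 1) 0 []).reverse

-- ===== PORT B =====
-- `for i in reversed(range(0, len(queue), m)): ret += queue[i:i+m]`
def solve_alt (queue : List Int) (m : Int) : List Int :=
  ((PySem.List.pyRange 0 (queue.length : Int) m).reverse).foldl
    (fun ret i => ret ++ PySem.List.slice queue (some i) (some (i + m))) []

-- ===== PRECONDITION & SPEC =====
-- m is a chunk size, so the natural domain is m ≥ 1. Pre_ excludes m ≤ 0, where A
-- loops forever on every nonempty queue (it returns, the empty list, only on
-- queue = []) and B's range(0, len, m) raises ValueError at m = 0.
def Pre_solve (queue : List Int) (m : Int) : Prop := 1 ≤ m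
instance (queue : List Int) (m : Int) : Decidable (Pre_solve queue m) := by unfold Pre_solve; infer_instance
def pvWitness_solve : List Int × Int := ([1, 2, 3], 2)

def Spec_solve (queue : List Int) (m : Int) (out : List Int) : Prop := out = solve_alt queue m
instance (queue : List Int) (m : Int) (out : List Int) : Decidable (Spec_solve queue m out) := by unfold Spec_solve; infer_instance

-- ===== CLAIM (what is proved, stated in full; the proofs are below) =====
def Claim_equal_solve : Prop := ∀ (queue : List Int) (m : Int), Dom_solve queue m → Pre_solve queue m → Spec_solve queue m (solve queue m)

-- ===== LEMMAS AND PROOFS =====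

-- cons/nil unfolding of pyRange for any positive step
theorem pyRange_pos_cons (a b : Int) {s : Int} (hs : 0 < s) :
    PySem.List.pyRange a b s =
      if a < b then a :: PySem.List.pyRange (a + s) b s else [] := by
  rw [PySem.List.pyRange_of_pos a b hs, PySem.List.pyRange_of_pos (a + s) b hs]
  by_cases hab : a < b
  · simp only [hab, if_true]
    have hnn : 0 ≤ (b - a - 1) / s := Int.ediv_nonneg (by omega) (by omega)
    have houter : (b - a + s - 1) / s = (b - a - 1) / s + 1 := by
      rw [show b - a + s - 1 = (b - a - 1) + 1 * s by ring,
        Int.add_mul_ediv_right _ _ (by omega : s ≠ 0)]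
    have hinner : (if a + s < b then ((b - (a + s) + s - 1) / s).toNat else 0)
        = ((b - a - 1) / s).toNat := by
      split
      · congr 1; ring_nf
      · rw [Int.ediv_eq_zero_of_lt (by omega) (by omega)]; rfl
    rw [hinner, houter, Int.toNat_add hnn (by omega), Int.toNat_one, List.range_succ_eq_map,
      List.map_cons, List.map_map]
    congr 1
    · push_cast; ring
    · exact List.map_congr_left (fun k _ => by simp only [Function.comp_apply]; push_cast; ring)
  · simp [hab]

-- A's loop with enough fuel = reversed chunks of the pyRange of chunk starts
theorem solveLoopA_eq (queue : List Int) (m : Int) (hm : 1 ≤ m) :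
    ∀ (f : Nat) (j : Int) (ret : List Int), (queue.length : Int) ≤ (f : Int) + j →
      solveLoopA queue m f j ret
        = ret ++ ((PySem.List.pyRange j (queue.length : Int) m).map
            (fun i => (PySem.List.slice queue (some i) (some (i + m))).reverse)).flatten := by
  intro f
  induction f with
  | zero =>
    intro j ret h
    rw [pyRange_pos_cons _ _ (by omega : (0:Int) < m), if_neg (by push_cast at h; omega)]
    simp [solveLoopA]
  | succ f ih =>
    intro j ret h
    rw [solveLoopA]
    split
    · rw [pyRange_pos_cons _ _ (by omega : (0:Int) < m), if_pos (by assumption),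
        List.map_cons, List.flatten_cons,
        ih (j + m) _ (by push_cast at h ⊢; omega)]
      simp [List.append_assoc]
    · rw [pyRange_pos_cons _ _ (by omega : (0:Int) < m), if_neg (by assumption)]
      simp

-- ===== VERDICT (by name: the statement is the Claim_ definition above) =====
theorem solve_spec : Claim_equal_solve := by
  intro queue m _ hpre
  unfold Spec_solve solve solve_alt
  rw [solveLoopA_eq queue m hpre (queue.length + 1) 0 [] (by push_cast; omega),
    PySem.List.foldl_append_eq_flatMap]
  simp [List.reverse_flatten, List.map_map, List.flatMap_def, List.map_reverse, Function.comp_def]
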